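-- pv_equiv track=rewrite | github.com/Luca-Mitchell/Construction-Indices | utils/GraphHandler.py | genDates
-- ===== SOURCE A (Python) =====
-- def genDates(num : int, startYear : int) -> list[str]:
--
--     '''generates x ticks in form of list ['year month', 'year month', 'year month', ...] and returns the list'''
--
--     months = ['Jan', 'Feb', 'Mar', 'Apr', 'May', 'Jun', 'Jul', 'Aug', 'Sep', 'Oct', 'Nov', 'Dec']
--     dates = []
--     year = startYear -1
--     for i in range(num):
--         if i % 12 == 0:
--             year += 1
--         dates.append(f'{year} {months[i % 12]}')
--     return dates
-- ===== SOURCE B (Python) =====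
-- def genDates(num : int, startYear : int) -> list[str]:
--     '''generates x ticks in form of list ['year month', 'year month', 'year month', ...] and returns the list'''
--     months = ['Jan', 'Feb', 'Mar', 'Apr', 'May', 'Jun', 'Jul', 'Aug', 'Sep', 'Oct', 'Nov', 'Dec']
--     if num <= 0:
--         return []
--     fullYears, rest = divmod(num, 12)
--     dates = []
--     for year in range(startYear, startYear + fullYears):
--         for month in months:
--             dates.append(f'{year} {month}')
--     lastYear = startYear + fullYears
--     for month in months[:rest]:
--         dates.append(f'{lastYear} {month}')
--     return dates
-- ===== Notes on version B (the rewrite author's own statement) =====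
-- stated objective: alternative
-- what changed: Replaces the flat index loop with rollover branch by a staged traversal: divmod(num,12) splits the range into whole years emitted by a nested years-then-months loop plus a final partial year from a months prefix slice; no per-item modulo or year-increment branch.
import Mathlib
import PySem

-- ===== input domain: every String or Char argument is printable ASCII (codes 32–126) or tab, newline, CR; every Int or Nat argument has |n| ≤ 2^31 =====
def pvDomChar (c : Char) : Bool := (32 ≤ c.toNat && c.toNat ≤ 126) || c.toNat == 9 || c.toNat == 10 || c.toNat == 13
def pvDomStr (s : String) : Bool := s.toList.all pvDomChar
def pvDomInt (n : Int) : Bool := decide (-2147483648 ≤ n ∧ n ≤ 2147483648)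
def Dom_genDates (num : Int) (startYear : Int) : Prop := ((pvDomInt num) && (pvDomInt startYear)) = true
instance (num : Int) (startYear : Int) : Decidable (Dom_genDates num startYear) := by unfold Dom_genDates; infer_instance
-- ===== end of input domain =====

-- B replaces A's flat index loop (with its i % 12 rollover branch) by a staged traversal:
-- divmod(num, 12) splits the output into whole years (nested years-then-months loops)
-- plus a final partial year from a months prefix slice (objective: alternative).

-- ===== PORT A =====
def genDatesMonths : List String :=
  ["Jan", "Feb", "Mar", "Apr", "May", "Jun", "Jul", "Aug", "Sep", "Oct", "Nov", "Dec"]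

-- the loop body: state (year, dates); the indexing is always in range (0 ≤ i%12 < 12)
def genDatesStep (st : Int × List String) (i : Int) : Int × List String :=
  let year := if PySem.Int.mod i 12 = 0 then st.1 + 1 else st.1
  (year, st.2 ++ [PySem.Int.toStr year ++ " " ++
                  PySem.List.pyGetD genDatesMonths (PySem.Int.mod i 12) ""])

def genDates (num : Int) (startYear : Int) : List String :=
  ((PySem.List.pyRange 0 num 1).foldl genDatesStep (startYear - 1, [])).2

-- ===== PORT B =====
def genDates_alt (num : Int) (startYear : Int) : List String :=
  if num ≤ 0 then []
  else
    let fullYears := PySem.Int.floordiv num 12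
    let rest := PySem.Int.mod num 12
    let full := (PySem.List.pyRange startYear (startYear + fullYears) 1).foldl
      (fun dates year =>
        genDatesMonths.foldl (fun dates month =>
          dates ++ [PySem.Int.toStr year ++ " " ++ month]) dates) []
    let lastYear := startYear + fullYears
    (PySem.List.slice genDatesMonths none (some rest)).foldl
      (fun dates month => dates ++ [PySem.Int.toStr lastYear ++ " " ++ month]) full

-- ===== PRECONDITION & SPEC =====
def Spec_genDates (num : Int) (startYear : Int) (out : List String) : Prop := out = genDates_alt num startYear
instance (num : Int) (startYear : Int) (out : List String) : Decidable (Spec_genDates num startYear out) := by unfold Spec_genDates; infer_instance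

-- ===== CLAIM (what is proved, stated in full; the proofs are below) =====
def Claim_equal_genDates : Prop := ∀ (num : Int) (startYear : Int), Dom_genDates num startYear → Spec_genDates num startYear (genDates num startYear)

-- ===== LEMMAS AND PROOFS =====

-- the entry at flat index k, as a function of a Nat index (common canonical form)
def genDatesEntry (sy : Int) (k : Nat) : String :=
  PySem.Int.toStr (sy + (k / 12 : Nat)) ++ " " ++ genDatesMonths.getD (k % 12) ""

lemma genDates_step_cast (st : Int × List String) (k : Nat) :
    genDatesStep st (k : Int) =
      (if k % 12 = 0 then st.1 + 1 else st.1,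
       st.2 ++ [PySem.Int.toStr (if k % 12 = 0 then st.1 + 1 else st.1) ++ " " ++
                genDatesMonths.getD (k % 12) ""]) := by
  have hmod : PySem.Int.mod (k : Int) 12 = ((k % 12 : Nat) : Int) := by
    exact_mod_cast PySem.Int.mod_natCast k 12
  have hif : (((k % 12 : Nat) : Int) = 0) ↔ (k % 12 = 0) := by omega
  simp only [genDatesStep, hmod, hif, PySem.List.pyGetD_natCast, List.getD]

-- A's loop invariant: after processing 0..n-1, year = sy + (n-1)/12 (or sy-1 when n=0),
-- and dates holds the canonical entries
lemma genDates_foldl_range (sy : Int) (n : Nat) :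
    List.foldl genDatesStep (sy - 1, []) (List.map (fun k : Nat => (k : Int)) (List.range n)) =
      ((if n = 0 then sy - 1 else sy + ((n - 1) / 12 : Nat)),
       (List.range n).map (genDatesEntry sy)) := by
  induction n with
  | zero => simp
  | succ m ih =>
    rw [List.range_succ, List.map_append, List.foldl_append, ih]
    simp only [List.map_cons, List.map_nil, List.foldl_cons, List.foldl_nil,
      genDates_step_cast, List.map_append]
    by_cases h0 : m = 0
    · subst h0; simp [genDatesEntry]
    · rw [if_neg h0, if_neg (by omega : ¬ m + 1 = 0)]
      by_cases h : m % 12 = 0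
      · have h12 : (m - 1) / 12 + 1 = m / 12 := by omega
        have hy : sy + ((m - 1) / 12 : Nat) + 1 = sy + ((m + 1 - 1) / 12 : Nat) := by
          push_cast [← h12]; ring
        simp only [h, genDatesEntry, hy]
        simp
      · have h12 : (m - 1) / 12 = m / 12 := by omega
        simp only [h, if_false, genDatesEntry, h12]
        simp

-- A produces the canonical list
lemma genDates_canon (num sy : Int) :
    genDates num sy = (List.range num.toNat).map (genDatesEntry sy) := by
  unfold genDates
  rw [PySem.List.pyRange_one]
  simp only [zero_add, Int.sub_zero]
  rw [genDates_foldl_range]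

-- a prefix of the months list, mapped, indexed by range
lemma genDates_take_map (y : Int) (r : Nat) (hr : r ≤ 12) :
    (genDatesMonths.take r).map (fun m => PySem.Int.toStr y ++ " " ++ m) =
      (List.range r).map (fun i => PySem.Int.toStr y ++ " " ++ genDatesMonths.getD i "") := by
  interval_cases r <;> rfl

-- the staged (years × months + prefix) decomposition equals the canonical flat list
lemma genDates_staged (sy : Int) (q r : Nat) (hr : r ≤ 12) :
    (List.range q).flatMap
        (fun j : Nat => genDatesMonths.map (fun m => PySem.Int.toStr (sy + j) ++ " " ++ m))
      ++ (genDatesMonths.take r).map (fun m => PySem.Int.toStr (sy + q) ++ " " ++ m)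
    = (List.range (12 * q + r)).map (genDatesEntry sy) := by
  induction q generalizing r with
  | zero =>
    rw [genDates_take_map _ r hr]
    simp only [List.range_zero, List.flatMap_nil, List.nil_append, Nat.mul_zero, Nat.zero_add]
    apply List.map_congr_left
    intro k hk
    have hk' : k < r := List.mem_range.mp hk
    have hdiv : k / 12 = 0 := by omega
    have hmod : k % 12 = k := by omega
    simp [genDatesEntry, hdiv, hmod]
  | succ p ih =>
    rw [List.range_succ, List.flatMap_append]
    have hblock : [p].flatMap
        (fun j : Nat => genDatesMonths.map (fun m => PySem.Int.toStr (sy + j) ++ " " ++ m)) =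
        (genDatesMonths.take 12).map (fun m => PySem.Int.toStr (sy + p) ++ " " ++ m) := by
      simp [genDatesMonths]
    rw [hblock, List.append_assoc]
    have hsplit : (12 * (p + 1) + r) = (12 * p + 12) + r := by ring
    rw [hsplit, List.range_add, List.map_append]
    have htail : (genDatesMonths.take r).map
          (fun m => PySem.Int.toStr (sy + (p + 1 : Nat)) ++ " " ++ m) =
        (List.range r).map (fun i => genDatesEntry sy (12 * p + 12 + i)) := by
      rw [genDates_take_map _ r hr]
      apply List.map_congr_left
      intro i hi
      have hi' : i < r := List.mem_range.mp hi
      have hdiv : (12 * p + 12 + i) / 12 = p + 1 := by omega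
      have hmod : (12 * p + 12 + i) % 12 = i := by omega
      simp [genDatesEntry, hdiv, hmod]
    rw [← List.append_assoc, ih 12 (le_refl 12), htail, List.map_map]
    rfl

-- B produces the canonical list too
lemma genDates_alt_canon (num sy : Int) :
    genDates_alt num sy = (List.range num.toNat).map (genDatesEntry sy) := by
  unfold genDates_alt
  by_cases h : num ≤ 0
  · rw [if_pos h]
    have : num.toNat = 0 := by omega
    simp [this]
  · rw [if_neg h]
    have hpos : 0 < num := by omega
    set n := num.toNat with hn
    have hnum : num = (n : Int) := by omega
    have hq : PySem.Int.floordiv num 12 = ((n / 12 : Nat) : Int) := by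
      rw [hnum]; exact_mod_cast PySem.Int.floordiv_natCast n 12
    have hr : PySem.Int.mod num 12 = ((n % 12 : Nat) : Int) := by
      rw [hnum]; exact_mod_cast PySem.Int.mod_natCast n 12
    simp only [hq, hr, PySem.List.slice_to_natCast, PySem.List.pyRange_one]
    have hlen : (sy + ((n / 12 : Nat) : Int) - sy).toNat = n / 12 := by omega
    rw [hlen, List.foldl_map]
    have houter : ∀ (init : List String) (l : List Nat),
        List.foldl (fun dates (k : Nat) =>
          genDatesMonths.foldl (fun dates month =>
            dates ++ [PySem.Int.toStr (sy + (k : Int)) ++ " " ++ month]) dates) init l =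
        init ++ l.flatMap (fun j : Nat =>
          genDatesMonths.map (fun m => PySem.Int.toStr (sy + j) ++ " " ++ m)) := by
      intro init l
      induction l generalizing init with
      | nil => simp
      | cons a t iht =>
        rw [List.foldl_cons, PySem.List.foldl_append_singleton_eq_map, iht,
          List.flatMap_cons, List.append_assoc]
    rw [houter, PySem.List.foldl_append_singleton_eq_map, List.nil_append]
    have hfin := genDates_staged sy (n / 12) (n % 12) (by omega)
    have hsum : 12 * (n / 12) + n % 12 = n := by omega
    rw [hsum] at hfin
    exact hfin

-- ===== VERDICT (by name: the statement is the Claim_ definition above) =====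
theorem genDates_spec : Claim_equal_genDates := by
  intro num startYear _
  unfold Spec_genDates
  rw [genDates_canon, genDates_alt_canon]
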